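-- pv_equiv track=rewrite | github.com/nguyenhoangha0710/Project_8PuzzleAI | dfs.py | ida_start
-- ===== SOURCE A (Python) =====
-- import copy
--
-- class Puzzle:
--     def __init__(self,state,parent=None,move="",cost=0):
--         self.state=state
--         self.parent=parent
--         self.move=move # buoc di tu cha den dday
--         self.cost=cost
--
--     def __lt__(self,other):
--         return self.cost<other.cost
--
-- def find_blank(state):
--     for i in range(3):
--         for j in range(3):
--             if state[i][j]==0:
--                 return i,j
--     return None
--
-- def move_black(state,direct):
--     i,j=find_blank(state)
--     if i is None or j is None:
--         return None
--     new_state=copy.deepcopy(state)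
--
--     moves = {"U": (-1, 0), "D": (1, 0), "L": (0, -1), "R": (0, 1)}
--     if direct not in moves:
--         return None
--     di,dj=moves[direct]
--     ni,nj=i+di,j+dj
--
--     if 0<=ni<3 and 0<=nj<3:
--         new_state[i][j], new_state[ni][nj] = new_state[ni][nj], new_state[i][j]
--         return new_state
--     return None
--
-- def mahatan_puzzle(start,goal):
--     cost=0
--     start_1D=[start[i][j] for i in range(3) for j in range(3)]
--     goal_1D=[goal[i][j] for i in range(3) for j in range(3)]
--
--     for i in range(3*3):
--         if start_1D[i]!=0:
--             goal_pos=goal_1D.index(start_1D[i])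
--             curr_x,curr_y=i//3,i%3
--             goal_x,goal_y=goal_pos//3,goal_pos%3
--             cost = cost + abs(curr_x-goal_x) + abs(curr_y - goal_y)
--     return cost
--
-- def ida_start(start,goal):
--     def search(node,g,threshold,visited_cost,path):
--         state_tuple=tuple(map(tuple,node.state))
--         h=mahatan_puzzle(node.state,goal)
--         f=g+h
--
--         if f > threshold:
--             return f,False,path
--         if node.state==goal:
--             return f,True,path
--
--         min_next_threshold = float('inf')
--         for move in ["U", "D", "L", "R"]:
--             new_state=move_black(node.state,move)
--             if new_state:
--                 new_state_tuple=tuple(map(tuple,new_state))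
--                 new_g=node.cost+1
--                 if new_state_tuple not in visited_cost or new_g<visited_cost[new_state_tuple]:
--                     visited_cost[new_state_tuple]=new_g
--                     new_node=Puzzle(new_state,node,move,new_g)
--                     new_path=path+[move]
--                     next_f,found,result_path=search(new_node,new_g,threshold,visited_cost,new_path)
--                     if found:
--                         return next_f,True,result_path
--                     min_next_threshold=min(min_next_threshold,next_f)
--         return min_next_threshold,False,path
--
--     initial_h=mahatan_puzzle(start,goal)
--     threshold=initial_h
--     visited_cost={tuple(map(tuple,start)):0}
--     max_space=1
--     while True:
--         path=[]
--         node=Puzzle(start,cost=0)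
--         visited_cost={tuple(map(tuple,start)): 0}
--         new_threshold,found,final_path=search(node,0,threshold,visited_cost,path)
--         max_space=max(max_space,len(visited_cost))
--
--         if found:
--             return final_path,len(final_path),max_space
--
--         if new_threshold==float('inf'):
--             return None,-1,max_space
--         threshold=new_threshold
-- ===== SOURCE B (Python) =====
-- import copy
--
-- def find_blank(state):
--     for i in range(3):
--         for j in range(3):
--             if state[i][j] == 0:
--                 return i, j
--     return None
--
-- def move_black(state, direct):
--     i, j = find_blank(state)
--     if i is None or j is None:
--         return None
--     new_state = copy.deepcopy(state)
--     moves = {"U": (-1, 0), "D": (1, 0), "L": (0, -1), "R": (0, 1)}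
--     if direct not in moves:
--         return None
--     di, dj = moves[direct]
--     ni, nj = i + di, j + dj
--     if 0 <= ni < 3 and 0 <= nj < 3:
--         new_state[i][j], new_state[ni][nj] = new_state[ni][nj], new_state[i][j]
--         return new_state
--     return None
--
-- def mahatan_puzzle(start, goal):
--     cost = 0
--     start_1D = [start[i][j] for i in range(3) for j in range(3)]
--     goal_1D = [goal[i][j] for i in range(3) for j in range(3)]
--     for i in range(3 * 3):
--         if start_1D[i] != 0:
--             goal_pos = goal_1D.index(start_1D[i])
--             curr_x, curr_y = i // 3, i % 3
--             goal_x, goal_y = goal_pos // 3, goal_pos % 3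
--             cost = cost + abs(curr_x - goal_x) + abs(curr_y - goal_y)
--     return cost
--
-- def ida_start(start, goal):
--     # Iterative-deepening DFS with an EXPLICIT stack of frames instead of the
--     # recursive `search`; child bound/goal checks happen at expansion time.
--     INF = float('inf')
--
--     def dfs(threshold, visited_cost):
--         # returns (next_threshold, found, path_to_goal)
--         h0 = mahatan_puzzle(start, goal)
--         if h0 > threshold:
--             return h0, False, []
--         if start == goal:
--             return h0, True, []
--         # frame: [state, g, remaining moves, min_next_threshold, path]
--         stack = [[start, 0, ["U", "D", "L", "R"], INF, []]]
--         while stack: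
--             frame = stack[-1]
--             state, g, moves, minv, path = frame
--             if not moves:
--                 stack.pop()
--                 if not stack:
--                     return minv, False, []
--                 parent = stack[-1]
--                 if minv < parent[3]:
--                     parent[3] = minv
--                 continue
--             mv = moves.pop(0)
--             ns = move_black(state, mv)
--             if ns is None:
--                 continue
--             t = tuple(map(tuple, ns))
--             ng = g + 1
--             if t in visited_cost and ng >= visited_cost[t]:
--                 continue
--             visited_cost[t] = ng
--             ff = ng + mahatan_puzzle(ns, goal)
--             npath = path + [mv]
--             if ff > threshold:
--                 if ff < frame[3]:
--                     frame[3] = ff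
--             elif ns == goal:
--                 return ff, True, npath
--             else:
--                 stack.append([ns, ng, ["U", "D", "L", "R"], INF, npath])
--         return INF, False, []  # unreachable
--
--     threshold = mahatan_puzzle(start, goal)
--     max_space = 1
--     while True:
--         visited_cost = {tuple(map(tuple, start)): 0}
--         new_threshold, found, final_path = dfs(threshold, visited_cost)
--         max_space = max(max_space, len(visited_cost))
--         if found:
--             return final_path, len(final_path), max_space
--         if new_threshold == INF:
--             return None, -1, max_space
--         threshold = new_threshold
-- ===== Notes on version B (the rewrite author's own statement) =====
-- stated objective: alternative
-- what changed: The recursive inner `search` is replaced by an explicit stack machine: one DFS loop over (state, g, remaining-moves, min-next-threshold, path) frames that performs the bound/goal checks at expansion time and propagates the minimum next threshold to the parent frame on pop, instead of recursion with per-call minima and bubbled-up return triples.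
import Mathlib
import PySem

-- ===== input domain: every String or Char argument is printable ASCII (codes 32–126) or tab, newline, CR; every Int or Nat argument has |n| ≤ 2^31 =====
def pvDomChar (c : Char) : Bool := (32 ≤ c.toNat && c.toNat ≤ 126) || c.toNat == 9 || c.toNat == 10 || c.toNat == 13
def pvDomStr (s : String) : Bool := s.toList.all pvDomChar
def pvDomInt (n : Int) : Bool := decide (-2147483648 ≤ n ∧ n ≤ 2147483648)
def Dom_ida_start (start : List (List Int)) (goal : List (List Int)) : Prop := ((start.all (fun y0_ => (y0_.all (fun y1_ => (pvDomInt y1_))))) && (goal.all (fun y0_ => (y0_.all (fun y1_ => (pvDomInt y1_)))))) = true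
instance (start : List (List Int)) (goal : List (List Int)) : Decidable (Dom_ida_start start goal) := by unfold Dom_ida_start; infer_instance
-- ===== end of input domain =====

-- B replaces A's recursive IDA* `search` by an explicit stack machine: one DFS loop over
-- (state, g, remaining-moves, min-threshold, path) frames that does the bound/goal checks at
-- expansion time and propagates the minimum next threshold on pop. Objective: alternative
-- decomposition, same asymptotic cost.

-- ===== PORT A =====
-- shared state-level helpers (identical helper functions in both Python files)

-- state[i][j] (total form; inside Pre_ all indices used are in range)
def get2 (s : List (List Int)) (i j : Int) : Int :=
  (PySem.List.pyGet? ((PySem.List.pyGet? s i).getD []) j).getD 0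

-- find_blank: nested `for i in range(3): for j in range(3)` with early return
def findBlankAux (s : List (List Int)) : List (Int × Int) → Option (Int × Int)
  | [] => none
  | (i, j) :: rest => if get2 s i j = 0 then some (i, j) else findBlankAux s rest

def findBlank (s : List (List Int)) : Option (Int × Int) :=
  findBlankAux s ((PySem.List.pyRange 0 3 1).flatMap (fun i => (PySem.List.pyRange 0 3 1).map (fun j => (i, j))))

-- new_state[i][j] = v  (indices produced by the callers are always in range)
def set2 (s : List (List Int)) (i j : Int) (v : Int) : List (List Int) :=
  match PySem.List.pyGet? s i with
  | none => s
  | some row => (PySem.List.pySet? s i ((PySem.List.pySet? row j v).getD row)).getD s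

-- move_black (Python raises TypeError when the state has no blank; that is outside Pre_,
-- the port returns none there)
def moveBlack (s : List (List Int)) (direct : String) : Option (List (List Int)) :=
  match findBlank s with
  | none => none
  | some (i, j) =>
    let dd : Option (Int × Int) :=
      if direct = "U" then some (-1, 0)
      else if direct = "D" then some (1, 0)
      else if direct = "L" then some (0, -1)
      else if direct = "R" then some (0, 1)
      else none
    match dd with
    | none => none
    | some (di, dj) =>
      let ni := i + di
      let nj := j + dj
      if 0 ≤ ni ∧ ni < 3 ∧ 0 ≤ nj ∧ nj < 3 then
        let a := get2 s i j
        let b := get2 s ni nj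
        some (set2 (set2 s i j b) ni nj a)
      else none

def to1D (s : List (List Int)) : List Int :=
  (PySem.List.pyRange 0 3 1).flatMap (fun i => (PySem.List.pyRange 0 3 1).map (fun j => get2 s i j))

-- mahatan_puzzle (goal_1D.index raises ValueError when a tile is missing: outside Pre_;
-- the port defaults that position to 0 there)
def manhattan (s g : List (List Int)) : Int :=
  let s1 := to1D s
  let g1 := to1D g
  (PySem.List.pyRange 0 9 1).foldl (fun cost i =>
    let v := (PySem.List.pyGet? s1 i).getD 0
    if v ≠ 0 then
      let gp := (PySem.List.index? g1 v).getD 0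
      cost + |PySem.Int.floordiv i 3 - PySem.Int.floordiv gp 3| + |PySem.Int.mod i 3 - PySem.Int.mod gp 3|
    else cost) 0

-- min with none = float('inf') on either side
def minOO : Option Int → Option Int → Option Int
  | none, b => b
  | some m, none => some m
  | some m, some f => some (min m f)

abbrev PuzRes := (Option Int × Bool × List String) × PySem.Dict (List (List Int)) Int

-- the `for move in [U,D,L,R]` loop of A's `search`, parameterised by the recursive call
def loopAgen (recur : PySem.Dict (List (List Int)) Int → List (List Int) → Int → List String → PuzRes)
    (s : List (List Int)) (g : Int) (path : List String) :
    List String → Option Int → PySem.Dict (List (List Int)) Int → PuzRes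
  | [], minv, v => ((minv, false, path), v)
  | mv :: ms, minv, v =>
    match moveBlack s mv with
    | none => loopAgen recur s g path ms minv v
    | some ns =>
      let ng := g + 1
      let ok := match v.get? ns with | none => true | some c => decide (ng < c)
      if ok then
        let v' := v.insert ns ng
        match recur v' ns ng (path ++ [mv]) with
        | ((f', true, p'), v'') => ((f', true, p'), v'')
        | ((f', false, _), v'') => loopAgen recur s g path ms (minOO minv f') v''
      else loopAgen recur s g path ms minv v

-- A's recursive `search`; the fuel (threshold.toNat + 2 at the root, strictly more than the
-- recursion can ever nest, since recursion only continues while g ≤ threshold) only guards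
-- totality of the Lean recursion
def searchA (goal : List (List Int)) (threshold : Int) (fuel : Nat)
    (v : PySem.Dict (List (List Int)) Int) (s : List (List Int)) (g : Int) (path : List String) : PuzRes :=
  let h := manhattan s goal
  let f := g + h
  if threshold < f then ((some f, false, path), v)
  else if s = goal then ((some f, true, path), v)
  else match fuel with
    | 0 => ((some 0, false, path), v)
    | n + 1 => loopAgen (searchA goal threshold n) s g path ["U", "D", "L", "R"] none v

-- the outer `while True` deepening loop of A (fuel-guarded; unreachable bottom)
def outerA (start goal : List (List Int)) : Nat → Int → Int → Option (List String) × Int × Int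
  | 0, _, maxSpace => (none, -1, maxSpace)
  | n + 1, threshold, maxSpace =>
    let v0 := (PySem.Dict.empty : PySem.Dict (List (List Int)) Int).insert start 0
    match searchA goal threshold (threshold.toNat + 2) v0 start 0 [] with
    | ((nt, found, fp), v') =>
      let ms' := max maxSpace ((v'.size : Int))
      if found then (some fp, (fp.length : Int), ms')
      else
        match nt with
        | none => (none, -1, ms')
        | some t => outerA start goal n t ms'

def ida_start (start : List (List Int)) (goal : List (List Int)) : Option (List String) × Int × Int :=
  outerA start goal 4294967296 (manhattan start goal) 1

-- ===== PORT B =====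

-- ===== PORT B =====

-- a DFS frame of B's explicit stack: [state, g, remaining moves, min_next_threshold, path];
-- the fuel field is only a totality guard for the Lean recursion (B's Python loop needs none)
structure Fr where
  st : List (List Int)
  g : Int
  fuel : Nat
  moves : List String
  minv : Option Int
  path : List String

-- B's stack-machine DFS loop (`while stack:`)
def execB (goal : List (List Int)) (threshold : Int)
    (v : PySem.Dict (List (List Int)) Int) (stack : List Fr) : PuzRes :=
  match stack with
  | [] => ((none, false, []), v)
  | ⟨st, gg, fuel, moves, minv, path⟩ :: rest =>
    match moves with
    | [] =>
      match rest with
      | [] => ((minv, false, []), v)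
      | p :: rest' => execB goal threshold v ({ p with minv := minOO p.minv minv } :: rest')
    | mv :: ms =>
      match moveBlack st mv with
      | none => execB goal threshold v (⟨st, gg, fuel, ms, minv, path⟩ :: rest)
      | some ns =>
        let ng := gg + 1
        let ok := match v.get? ns with | none => true | some c => decide (ng < c)
        if ok then
          let v' := v.insert ns ng
          let ff := ng + manhattan ns goal
          let npath := path ++ [mv]
          if threshold < ff then
            execB goal threshold v' (⟨st, gg, fuel, ms, minOO minv (some ff), path⟩ :: rest)
          else if ns = goal then ((some ff, true, npath), v')
          else
            match fuel with
            | 0 => execB goal threshold v' (⟨st, gg, 0, ms, minOO minv (some 0), path⟩ :: rest)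
            | k + 1 => execB goal threshold v' (⟨ns, ng, k, ["U", "D", "L", "R"], none, npath⟩ :: ⟨st, gg, k + 1, ms, minv, path⟩ :: rest)
        else execB goal threshold v (⟨st, gg, fuel, ms, minv, path⟩ :: rest)
termination_by (stack.map (fun f => (f.moves.length + 2) * 7 ^ f.fuel)).sum
decreasing_by
  all_goals simp_all [List.map_cons, List.sum_cons]
  all_goals rw [pow_succ]
  all_goals nlinarith [pow_pos (by norm_num : (0:ℕ) < 7) k]

-- B's `dfs(threshold, visited_cost)`
def dfsB (start goal : List (List Int)) (threshold : Int)
    (v : PySem.Dict (List (List Int)) Int) : PuzRes :=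
  let h0 := manhattan start goal
  if threshold < h0 then ((some h0, false, []), v)
  else if start = goal then ((some h0, true, []), v)
  else execB goal threshold v [⟨start, 0, threshold.toNat + 1, ["U", "D", "L", "R"], none, []⟩]

-- B's outer deepening loop (same as A's outer loop; the change is the inner search)
def outerB (start goal : List (List Int)) : Nat → Int → Int → Option (List String) × Int × Int
  | 0, _, maxSpace => (none, -1, maxSpace)
  | n + 1, threshold, maxSpace =>
    let v0 := (PySem.Dict.empty : PySem.Dict (List (List Int)) Int).insert start 0
    match dfsB start goal threshold v0 with
    | ((nt, found, fp), v') =>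
      let ms' := max maxSpace ((v'.size : Int))
      if found then (some fp, (fp.length : Int), ms')
      else
        match nt with
        | none => (none, -1, ms')
        | some t => outerB start goal n t ms'

def ida_start_alt (start : List (List Int)) (goal : List (List Int)) : Option (List String) × Int × Int :=
  outerB start goal 4294967296 (manhattan start goal) 1

-- ===== PRECONDITION & SPEC =====

def pvCell (s : List (List Int)) (i j : Nat) : Int := (s.getD i []).getD j 0
def pvCells (s : List (List Int)) : List Int :=
  (List.range 3).flatMap (fun i => (List.range 3).map (fun j => pvCell s i j))

-- Pre_ excludes exactly the inputs on which the Python raises: grids whose first three rows do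
-- not each have three entries (IndexError in mahatan_puzzle), a nonzero tile of start's 3x3
-- block missing from goal's 3x3 block (ValueError from goal_1D.index), and a start without a
-- blank that is not already equal to goal (TypeError unpacking find_blank's None in move_black).
def Pre_ida_start (start : List (List Int)) (goal : List (List Int)) : Prop :=
  3 ≤ start.length ∧ (∀ i < 3, 3 ≤ (start.getD i []).length) ∧
  3 ≤ goal.length ∧ (∀ i < 3, 3 ≤ (goal.getD i []).length) ∧
  (∀ x ∈ pvCells start, x ≠ 0 → x ∈ pvCells goal) ∧
  ((0 : Int) ∈ pvCells start ∨ start = goal)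
instance (start : List (List Int)) (goal : List (List Int)) : Decidable (Pre_ida_start start goal) := by
  unfold Pre_ida_start; infer_instance

def pvWitness_ida_start : List (List Int) × List (List Int) :=
  ([[1, 2, 3], [4, 5, 6], [7, 8, 0]], [[1, 2, 3], [4, 5, 0], [7, 8, 6]])

def Spec_ida_start (start : List (List Int)) (goal : List (List Int)) (out : Option (List String) × Int × Int) : Prop := out = ida_start_alt start goal
instance (start : List (List Int)) (goal : List (List Int)) (out : Option (List String) × Int × Int) : Decidable (Spec_ida_start start goal out) := by unfold Spec_ida_start; infer_instance

-- ===== CLAIM (what is proved, stated in full; the proofs are below) =====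
def Claim_equal_ida_start : Prop := ∀ (start : List (List Int)) (goal : List (List Int)), Dom_ida_start start goal → Pre_ida_start start goal → Spec_ida_start start goal (ida_start start goal)

-- ===== LEMMAS AND PROOFS =====

theorem loop_false_path (recur) (s : List (List Int)) (g : Int) (path : List String) :
    ∀ (moves : List String) (minv : Option Int) (v : PySem.Dict (List (List Int)) Int),
      (loopAgen recur s g path moves minv v).1.2.1 = false →
      (loopAgen recur s g path moves minv v).1.2.2 = path := by
  intro moves
  induction moves with
  | nil => intro minv v _; simp [loopAgen]
  | cons mv ms ih =>
    intro minv v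
    simp only [loopAgen]
    cases hmb : moveBlack s mv with
    | none => exact ih minv v
    | some ns =>
      simp only []
      cases hget : PySem.Dict.get? v ns with
      | none =>
        simp only [if_true]
        rcases hr : recur (v.insert ns (g + 1)) ns (g + 1) (path ++ [mv]) with ⟨⟨f', fnd, p'⟩, v''⟩
        cases fnd with
        | true => intro h; simp at h
        | false => exact ih _ _
      | some c =>
        simp only []
        by_cases hlt : (g + 1 < c)
        · simp only [hlt, decide_true, if_true]
          rcases hr : recur (v.insert ns (g + 1)) ns (g + 1) (path ++ [mv]) with ⟨⟨f', fnd, p'⟩, v''⟩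
          cases fnd with
          | true => intro h; simp at h
          | false => exact ih _ _
        · simp only [hlt, decide_false]
          exact ih minv v

def afterPop (goal : List (List Int)) (threshold : Int) (f : Option Int)
    (rest : List Fr) (v : PySem.Dict (List (List Int)) Int) : PuzRes :=
  match rest with
  | [] => ((f, false, []), v)
  | p :: rest' => execB goal threshold v ({ p with minv := minOO p.minv f } :: rest')

def wrapRes (goal : List (List Int)) (threshold : Int) (rest : List Fr) (r : PuzRes) : PuzRes :=
  match r with
  | ((f, true, p), v) => ((f, true, p), v)
  | ((f, false, _), v) => afterPop goal threshold f rest v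

theorem exec_eq_loop (goal : List (List Int)) (threshold : Int) :
    ∀ (n : Nat) (moves : List String) (s : List (List Int)) (g : Int) (path : List String)
      (minv : Option Int) (v : PySem.Dict (List (List Int)) Int) (rest : List Fr),
      execB goal threshold v (⟨s, g, n, moves, minv, path⟩ :: rest) =
        wrapRes goal threshold rest (loopAgen (searchA goal threshold n) s g path moves minv v) := by
  intro n
  induction n using Nat.strong_induction_on with
  | _ n IHn =>
  intro moves
  induction moves with
  | nil =>
    intro s g path minv v rest
    rw [execB.eq_def]
    cases rest with
    | nil => simp [loopAgen, wrapRes, afterPop]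
    | cons p rest' => simp [loopAgen, wrapRes, afterPop]
  | cons mv ms ihms =>
    intro s g path minv v rest
    rw [execB.eq_def]
    simp only [loopAgen]
    cases hmb : moveBlack s mv with
    | none => exact ihms s g path minv v rest
    | some ns =>
      simp only []
      cases hget : PySem.Dict.get? v ns with
      | none =>
        simp only [if_true]
        by_cases hth : threshold < g + 1 + manhattan ns goal
        · rw [if_pos hth, ihms, searchA.eq_def]
          simp only [hth, if_true]
        · rw [if_neg hth]
          by_cases hgoal : ns = goal
          · subst hgoal
            rw [searchA.eq_def]
            simp [hth, wrapRes]
          · rw [if_neg hgoal, searchA.eq_def]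
            simp only [hth, if_false, hgoal]
            cases n with
            | zero =>
              split
              · rw [ihms]
              · omega
            | succ k =>
              split
              · omega
              · rename_i k2 heq
                have hk : k2 = k := by omega
                subst hk
                rcases hr2 : loopAgen (searchA goal threshold k2) ns (g + 1) (path ++ [mv])
                    ["U", "D", "L", "R"] none (v.insert ns (g + 1)) with ⟨⟨f2, fnd2, p2⟩, v2⟩
                rw [IHn k2 (by omega), hr2]
                cases fnd2 with
                | true => simp [wrapRes]
                | false =>
                  simp only [wrapRes, afterPop]
                  rw [ihms]
                  rfl
      | some c =>
        simp only []
        by_cases hlt : (g + 1 < c)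
        · simp only [hlt, decide_true, if_true]
          by_cases hth : threshold < g + 1 + manhattan ns goal
          · rw [if_pos hth, ihms, searchA.eq_def]
            simp only [hth, if_true]
          · rw [if_neg hth]
            by_cases hgoal : ns = goal
            · subst hgoal
              rw [searchA.eq_def]
              simp [hth, wrapRes]
            · rw [if_neg hgoal, searchA.eq_def]
              simp only [hth, if_false, hgoal]
              cases n with
              | zero =>
                split
                · rw [ihms]
                · omega
              | succ k =>
                split
                · omega
                · rename_i k2 heq
                  have hk : k2 = k := by omega
                  subst hk
                  rcases hr2 : loopAgen (searchA goal threshold k2) ns (g + 1) (path ++ [mv])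
                      ["U", "D", "L", "R"] none (v.insert ns (g + 1)) with ⟨⟨f2, fnd2, p2⟩, v2⟩
                  rw [IHn k2 (by omega), hr2]
                  cases fnd2 with
                  | true => simp [wrapRes]
                  | false =>
                    simp only [wrapRes, afterPop]
                    rw [ihms]
                    rfl
        · simp only [hlt, decide_false]
          exact ihms s g path minv v rest

theorem dfs_eq (start goal : List (List Int)) (threshold : Int) (v : PySem.Dict (List (List Int)) Int) :
    dfsB start goal threshold v = searchA goal threshold (threshold.toNat + 2) v start 0 [] := by
  unfold dfsB
  rw [searchA.eq_def]
  simp only [zero_add]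
  by_cases h1 : threshold < manhattan start goal
  · simp [h1]
  · simp only [h1, if_false]
    by_cases h2 : start = goal
    · simp [h2]
    · simp only [h2, if_false]
      rw [exec_eq_loop]
      rcases hr : loopAgen (searchA goal threshold (threshold.toNat + 1)) start 0 []
          ["U", "D", "L", "R"] none v with ⟨⟨f, fnd, p⟩, v'⟩
      cases fnd with
      | true => simp [wrapRes]
      | false =>
        have hp := loop_false_path (searchA goal threshold (threshold.toNat + 1)) start 0 []
          ["U", "D", "L", "R"] none v
        rw [hr] at hp
        simp at hp
        subst hp
        simp [wrapRes, afterPop]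

theorem outer_eq (start goal : List (List Int)) :
    ∀ (n : Nat) (threshold maxSpace : Int),
      outerB start goal n threshold maxSpace = outerA start goal n threshold maxSpace := by
  intro n
  induction n with
  | zero => intro th ms; rfl
  | succ n ih =>
    intro th ms
    simp only [outerA, outerB, dfs_eq]
    rcases hsa : searchA goal th (th.toNat + 2)
        ((PySem.Dict.empty : PySem.Dict (List (List Int)) Int).insert start 0) start 0 [] with ⟨⟨nt, found, fp⟩, v'⟩
    cases found <;> rcases nt with _ | t <;> simp [ih]

-- ===== VERDICT (by name: the statement is the Claim_ definition above) =====
theorem ida_start_spec : Claim_equal_ida_start := by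
  intro start goal _ _
  unfold Spec_ida_start ida_start ida_start_alt
  rw [outer_eq]
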